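-- pv_equiv track=rewrite | github.com/AppleYoujatea/OriginalApplePie | 2nd_quarter/week04/pepe/신고결과받기.py | solution
-- ===== SOURCE A (Python) =====
-- from collections import defaultdict
--
-- def solution(id_list, report, k):
--
--     dict1 = defaultdict(set)
--     dict2 = defaultdict(set)
--
--     for rep in report:
--         user, target = rep.split()
--         dict1[user].add(target)
--         dict2[target].add(user)
--
--     result = []
--     for user in id_list:
--         tmp = 0
--         for target in dict1[user]:
--             if len(dict2[target]) >= k:
--                 tmp += 1
--         result.append(tmp)
--
--     return result
-- ===== SOURCE B (Python) =====
-- def solution(id_list, report, k):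
--     pairs = set()
--     for rep in report:
--         user, target = rep.split()
--         pairs.add((user, target))
--     counter = {}
--     for _, target in pairs:
--         counter[target] = counter.get(target, 0) + 1
--     banned = {t for t, c in counter.items() if c >= k}
--     result = {uid: 0 for uid in id_list}
--     for user, target in pairs:
--         if target in banned and user in result:
--             result[user] += 1
--     return [result[uid] for uid in id_list]
-- ===== Notes on version B (the rewrite author's own statement) =====
-- stated objective: alternative
-- what changed: A builds per-user and per-target dict-of-set maps and runs a nested loop over each user's reported targets with a len lookup; B dedupes the report into one set of (user,target) pairs, counts distinct reporters per target with one counter pass, precomputes the banned set, and tallies results in a single scatter pass over the unique pairs.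
import Mathlib
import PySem

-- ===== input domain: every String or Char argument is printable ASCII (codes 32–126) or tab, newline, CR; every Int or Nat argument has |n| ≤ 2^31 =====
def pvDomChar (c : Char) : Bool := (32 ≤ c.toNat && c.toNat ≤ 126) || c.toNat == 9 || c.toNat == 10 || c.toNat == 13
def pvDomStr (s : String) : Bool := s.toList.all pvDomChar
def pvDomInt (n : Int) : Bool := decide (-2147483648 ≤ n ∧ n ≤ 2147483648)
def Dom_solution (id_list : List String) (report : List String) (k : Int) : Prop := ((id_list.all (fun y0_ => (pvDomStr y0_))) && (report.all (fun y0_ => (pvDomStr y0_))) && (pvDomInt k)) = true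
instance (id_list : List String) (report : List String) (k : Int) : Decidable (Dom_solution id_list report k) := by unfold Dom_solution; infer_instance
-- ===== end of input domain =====

-- B replaces A's two dict-of-set maps and nested per-user target loop by a deduped pair set,
-- a reporter counter, a precomputed banned set and one scatter pass (alternative decomposition, same cost).


-- ===== PORT A =====
-- 'for rep in report: user, target = rep.split(); dict1[user].add(target); dict2[target].add(user)'
-- (a rep that does not split into exactly two words raises ValueError → excluded by Pre_solution; the '_ => st' arm is unreachable there)
def solutionBuild (st : PySem.Dict String (PySem.Set String) × PySem.Dict String (PySem.Set String))
    (rep : String) : PySem.Dict String (PySem.Set String) × PySem.Dict String (PySem.Set String) :=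
  match PySem.Str.split₀ rep with
  | [user, target] =>
      (st.1.insert user (PySem.Set.add (st.1.getD user []) target),
       st.2.insert target (PySem.Set.add (st.2.getD target []) user))
  | _ => st

def solution (id_list : List String) (report : List String) (k : Int) : List Int :=
  let ds := report.foldl solutionBuild (PySem.Dict.empty, PySem.Dict.empty)
  id_list.map (fun user =>
    (ds.1.getD user []).foldl
      (fun tmp target => if k ≤ PySem.Set.len (ds.2.getD target []) then tmp + 1 else tmp) 0)

-- ===== PORT B =====
-- Source B: pairs = {(user, target) for rep in report}; counter of distinct reporters per target;
-- banned = {t | counter[t] >= k}; result = {uid: 0}; one scatter pass over pairs; readout.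
def solution_alt (id_list : List String) (report : List String) (k : Int) : List Int :=
  let pairs : PySem.Set (String × String) := report.foldl (fun ps rep =>
      match PySem.Str.split₀ rep with
      | [user, target] => PySem.Set.add ps (user, target)
      | _ => ps) PySem.Set.empty    -- the '_ => ps' arm is the ValueError case, excluded by Pre_solution
  let counter : PySem.Dict String Int :=
      pairs.foldl (fun c p => c.insert p.2 (c.getD p.2 0 + 1)) PySem.Dict.empty
  let banned : PySem.Set String :=
      PySem.Set.ofList ((counter.items.filter (fun tc => decide (k ≤ tc.2))).map Prod.fst)
  let result0 : PySem.Dict String Int :=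
      id_list.foldl (fun d uid => d.insert uid 0) PySem.Dict.empty
  let result := pairs.foldl (fun d p =>
      if PySem.Set.contains banned p.2 && d.contains p.1 then d.insert p.1 (d.getD p.1 0 + 1) else d)
    result0
  id_list.map (fun uid => result.getD uid 0)

-- ===== PRECONDITION & SPEC =====
-- Pre_: every report line must split into exactly two whitespace-separated words;
-- otherwise 'user, target = rep.split()' raises ValueError in both A and B.
def Pre_solution (id_list : List String) (report : List String) (k : Int) : Prop :=
  ∀ rep ∈ report, (PySem.Str.split₀ rep).length = 2
instance (id_list : List String) (report : List String) (k : Int) : Decidable (Pre_solution id_list report k) := by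
  unfold Pre_solution; infer_instance
def pvWitness_solution : List String × List String × Int := (["muzi", "frodo"], ["muzi frodo", "frodo muzi", "muzi frodo"], 1)

def Spec_solution (id_list : List String) (report : List String) (k : Int) (out : List Int) : Prop := out = solution_alt id_list report k
instance (id_list : List String) (report : List String) (k : Int) (out : List Int) : Decidable (Spec_solution id_list report k out) := by unfold Spec_solution; infer_instance

-- ===== CLAIM (what is proved, stated in full; the proofs are below) =====
def Claim_equal_solution : Prop := ∀ (id_list : List String) (report : List String) (k : Int), Dom_solution id_list report k → Pre_solution id_list report k → Spec_solution id_list report k (solution id_list report k)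

-- ===== LEMMAS AND PROOFS =====

-- proof-side helpers: the parsed pair of one report line, and the deduped pair list
def pvParse (rep : String) : String × String :=
  ((PySem.Str.split₀ rep).getD 0 "", (PySem.Str.split₀ rep).getD 1 "")

def pvPairs (report : List String) : List (String × String) :=
  PySem.Set.ofList (report.map pvParse)

lemma split_two {rep : String} (h : (PySem.Str.split₀ rep).length = 2) :
    PySem.Str.split₀ rep = [(pvParse rep).1, (pvParse rep).2] := by
  obtain ⟨a, b, hab⟩ := List.length_eq_two.mp h
  simp [pvParse, hab]

lemma pairsB_eq (report : List String) (h : ∀ rep ∈ report, (PySem.Str.split₀ rep).length = 2) :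
    ∀ s : PySem.Set (String × String),
      report.foldl (fun ps rep =>
        match PySem.Str.split₀ rep with
        | [user, target] => PySem.Set.add ps (user, target)
        | _ => ps) s = (report.map pvParse).foldl PySem.Set.add s := by
  induction report with
  | nil => intro s; rfl
  | cons r rest ih =>
    intro s
    have hr := split_two (h r (by simp))
    simp only [List.foldl_cons, List.map_cons, hr]
    exact ih (fun x hx => h x (by simp [hx])) _

lemma pairs_eq_pvPairs (report : List String)
    (h : ∀ rep ∈ report, (PySem.Str.split₀ rep).length = 2) :
    report.foldl (fun ps rep =>
        match PySem.Str.split₀ rep with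
        | [user, target] => PySem.Set.add ps (user, target)
        | _ => ps) PySem.Set.empty = pvPairs report := by
  rw [pairsB_eq report h, pvPairs, PySem.Set.ofList_eq_foldl, PySem.Set.empty]

-- A's two dict-of-set maps, characterised against the deduped pair list
lemma A_inv (report : List String) (h : ∀ rep ∈ report, (PySem.Str.split₀ rep).length = 2) :
    (∀ u, ((report.foldl solutionBuild (PySem.Dict.empty, PySem.Dict.empty)).1.getD u []).Nodup ∧
      ∀ t, (t ∈ (report.foldl solutionBuild (PySem.Dict.empty, PySem.Dict.empty)).1.getD u [] ↔
             (u, t) ∈ pvPairs report)) ∧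
    (∀ t, ((report.foldl solutionBuild (PySem.Dict.empty, PySem.Dict.empty)).2.getD t []).Nodup ∧
      ∀ u, (u ∈ (report.foldl solutionBuild (PySem.Dict.empty, PySem.Dict.empty)).2.getD t [] ↔
             (u, t) ∈ pvPairs report)) := by
  induction report using List.reverseRecOn with
  | nil =>
    simp [pvPairs, PySem.Dict.getD_empty]
  | append_singleton rest r ih =>
    have hrest : ∀ rep ∈ rest, (PySem.Str.split₀ rep).length = 2 :=
      fun x hx => h x (by simp [hx])
    obtain ⟨ih1, ih2⟩ := ih hrest
    have hr := split_two (h r (by simp))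
    have hP : pvPairs (rest ++ [r]) = PySem.Set.add (pvPairs rest) (pvParse r) := by
      simp [pvPairs, PySem.Set.ofList_append_singleton]
    rw [List.foldl_append]
    simp only [List.foldl_cons, List.foldl_nil, solutionBuild, hr, hP]
    constructor
    · intro u
      by_cases hu : u = (pvParse r).1
      · subst hu
        rw [PySem.Dict.getD_insert, if_pos rfl]
        refine ⟨PySem.Set.nodup_add _ _ (ih1 _).1, fun t => ?_⟩
        rw [PySem.Set.mem_add, PySem.Set.mem_add, (ih1 _).2 t]
        constructor
        · rintro (hp | rfl)
          · exact Or.inl hp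
          · exact Or.inr rfl
        · rintro (hp | hpt)
          · exact Or.inl hp
          · exact Or.inr (congrArg Prod.snd hpt)
      · rw [PySem.Dict.getD_insert]
        simp only [if_neg hu]
        refine ⟨(ih1 u).1, fun t => ?_⟩
        rw [PySem.Set.mem_add, (ih1 u).2 t]
        constructor
        · exact Or.inl
        · rintro (hp | hpt)
          · exact hp
          · exact absurd (congrArg Prod.fst hpt) hu
    · intro t
      by_cases ht : t = (pvParse r).2
      · subst ht
        rw [PySem.Dict.getD_insert, if_pos rfl]
        refine ⟨PySem.Set.nodup_add _ _ (ih2 _).1, fun u => ?_⟩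
        rw [PySem.Set.mem_add, PySem.Set.mem_add, (ih2 _).2 u]
        constructor
        · rintro (hp | rfl)
          · exact Or.inl hp
          · exact Or.inr rfl
        · rintro (hp | hpt)
          · exact Or.inl hp
          · exact Or.inr (congrArg Prod.fst hpt)
      · rw [PySem.Dict.getD_insert]
        simp only [if_neg ht]
        refine ⟨(ih2 t).1, fun u => ?_⟩
        rw [PySem.Set.mem_add, (ih2 t).2 u]
        constructor
        · exact Or.inl
        · rintro (hp | hpt)
          · exact hp
          · exact absurd (congrArg Prod.snd hpt) ht

-- a Nodup list is as long as the matching filter of the pair list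
lemma length_eq_countP_snd {L : List String} {P : List (String × String)} {t : String}
    (hL : L.Nodup) (hP : P.Nodup) (hmem : ∀ u, u ∈ L ↔ (u, t) ∈ P) :
    L.length = P.countP (fun p => p.2 == t) := by
  have hfl : ((P.filter (fun p => p.2 == t)).map Prod.fst).Nodup := by
    refine List.Nodup.map_on ?_ (hP.filter _)
    intro x hx y hy hxy
    have hx2 := (List.mem_filter.mp hx).2
    have hy2 := (List.mem_filter.mp hy).2
    have : x.2 = t := by simpa using hx2
    have : x.2 = y.2 := by simp_all
    exact Prod.ext hxy this
  have hm : ∀ u, u ∈ (P.filter (fun p => p.2 == t)).map Prod.fst ↔ (u, t) ∈ P := by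
    intro u
    simp only [List.mem_map, List.mem_filter]
    constructor
    · rintro ⟨p, ⟨hp, hpt⟩, rfl⟩
      have : p.2 = t := by simpa using hpt
      simpa [← this] using hp
    · intro hp
      exact ⟨(u, t), ⟨hp, by simp⟩, rfl⟩
  have hperm : L.Perm ((P.filter (fun p => p.2 == t)).map Prod.fst) :=
    (List.perm_ext_iff_of_nodup hL hfl).mpr (fun u => (hmem u).trans (hm u).symm)
  rw [hperm.length_eq, List.length_map, ← List.countP_eq_length_filter]

-- countP over a user's target bucket = countP over the pair list
lemma countP_bucket {L : List String} {P : List (String × String)} {u : String} {q : String → Bool}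
    (hL : L.Nodup) (hP : P.Nodup) (hmem : ∀ t, t ∈ L ↔ (u, t) ∈ P) :
    L.countP q = P.countP (fun p => q p.2 && p.1 == u) := by
  have hfl : ((P.filter (fun p => p.1 == u)).map Prod.snd).Nodup := by
    refine List.Nodup.map_on ?_ (hP.filter _)
    intro x hx y hy hxy
    have hx2 := (List.mem_filter.mp hx).2
    have hy2 := (List.mem_filter.mp hy).2
    have : x.1 = u := by simpa using hx2
    have : x.1 = y.1 := by simp_all
    exact Prod.ext this hxy
  have hm : ∀ t, t ∈ (P.filter (fun p => p.1 == u)).map Prod.snd ↔ (u, t) ∈ P := by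
    intro t
    simp only [List.mem_map, List.mem_filter]
    constructor
    · rintro ⟨p, ⟨hp, hpu⟩, rfl⟩
      have : p.1 = u := by simpa using hpu
      simpa [← this] using hp
    · intro hp
      exact ⟨(u, t), ⟨hp, by simp⟩, rfl⟩
  have hperm : L.Perm ((P.filter (fun p => p.1 == u)).map Prod.snd) :=
    (List.perm_ext_iff_of_nodup hL hfl).mpr (fun t => (hmem t).trans (hm t).symm)
  rw [hperm.countP_eq, List.countP_map, List.countP_filter]
  rfl

-- B's counter fold is Counter(pairs.map snd)
lemma counter_eq (P : List (String × String)) :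
    P.foldl (fun c p => c.insert p.2 (c.getD p.2 0 + 1)) PySem.Dict.empty
      = PySem.Dict.counter (P.map Prod.snd) := by
  rw [← PySem.Dict.foldl_insert_getD_add_one_eq_counter, List.foldl_map]

-- membership in B's banned set
lemma mem_banned (P : List (String × String)) (k : Int) (t : String) :
    t ∈ PySem.Set.ofList ((((PySem.Dict.counter (P.map Prod.snd)).items.filter
          (fun tc => decide (k ≤ tc.2))).map Prod.fst)) ↔
      t ∈ P.map Prod.snd ∧ k ≤ ((P.map Prod.snd).count t : Int) := by
  rw [PySem.Dict.items_counter, List.filter_map, List.map_map]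
  have : (Prod.fst ∘ fun x => (x, ((P.map Prod.snd).count x : Int))) = id := rfl
  rw [this, List.map_id]
  rw [PySem.Set.ofList_eq_self_of_nodup _ ((PySem.Set.nodup_ofList _).filter _)]
  simp [List.mem_filter, PySem.Set.mem_ofList, Function.comp]

-- initial result dict: every id maps to 0, keys are exactly id_list
lemma r0_getD : ∀ (l : List String) (d : PySem.Dict String Int) (u : String),
    (l.foldl (fun d uid => d.insert uid 0) d).getD u 0 = if u ∈ l then 0 else d.getD u 0 := by
  intro l
  induction l with
  | nil => intro d u; simp
  | cons x l ih =>
    intro d u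
    rw [List.foldl_cons, ih]
    by_cases hu : u ∈ l
    · simp [hu]
    · by_cases hx : u = x <;> simp [hu, hx, PySem.Dict.getD_insert]

lemma r0_contains : ∀ (l : List String) (d : PySem.Dict String Int) (u : String),
    (l.foldl (fun d uid => d.insert uid 0) d).contains u = (decide (u ∈ l) || d.contains u) := by
  intro l
  induction l with
  | nil => intro d u; simp
  | cons x l ih =>
    intro d u
    rw [List.foldl_cons, ih]
    by_cases hu : u ∈ l
    · simp [hu]
    · by_cases hx : u = x <;> simp [hu, hx, PySem.Dict.contains_insert]

-- one scatter step does not change the key set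
lemma contains_scatter_step (banned : PySem.Set String) (d : PySem.Dict String Int)
    (p : String × String) (x : String) :
    (if PySem.Set.contains banned p.2 && d.contains p.1
       then d.insert p.1 (d.getD p.1 0 + 1) else d).contains x = d.contains x := by
  by_cases hc : PySem.Set.contains banned p.2 && d.contains p.1
  · rw [if_pos hc, PySem.Dict.contains_insert]
    by_cases hx : x = p.1
    · subst hx
      simp only [Bool.and_eq_true] at hc
      simp [hc.2]
    · simp [hx]
  · rw [if_neg hc]

-- the scatter pass adds, for each key in the dict, the count of its banned pairs
lemma scatter_getD (banned : PySem.Set String) :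
    ∀ (l : List (String × String)) (d : PySem.Dict String Int) (u : String),
      d.contains u = true →
      (l.foldl (fun d p =>
          if PySem.Set.contains banned p.2 && d.contains p.1
            then d.insert p.1 (d.getD p.1 0 + 1) else d) d).getD u 0
        = d.getD u 0 + (l.countP (fun p => PySem.Set.contains banned p.2 && p.1 == u) : Int) := by
  intro l
  induction l with
  | nil => intro d u _; simp
  | cons p l ih =>
    intro d u hu
    rw [List.foldl_cons, ih _ u (by rw [contains_scatter_step]; exact hu)]
    have hstep : (if PySem.Set.contains banned p.2 && d.contains p.1
          then d.insert p.1 (d.getD p.1 0 + 1) else d).getD u 0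
        = d.getD u 0 + (if PySem.Set.contains banned p.2 && p.1 == u then 1 else 0) := by
      by_cases hp : p.1 = u
      · subst hp
        by_cases hb : PySem.Set.contains banned p.2
        · have hb' : p.2 ∈ banned := by simpa using hb
          rw [if_pos (by simp [hb', hu]), PySem.Dict.getD_insert]
          simp [hb']
        · have hb' : p.2 ∉ banned := by simpa using hb
          rw [if_neg (by simp [hb'])]
          simp [hb']
      · by_cases hc : PySem.Set.contains banned p.2 && d.contains p.1
        · rw [if_pos hc, PySem.Dict.getD_insert, if_neg (fun h => hp h.symm)]
          simp [hp]
        · rw [if_neg hc]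
          simp [hp]
    rw [hstep, List.countP_cons]
    by_cases hcc : PySem.Set.contains banned p.2 && p.1 == u <;> simp [hcc] <;> ring

-- ===== VERDICT (by name: the statement is the Claim_ definition above) =====
theorem solution_spec : Claim_equal_solution := by
  intro id_list report k _ hpre
  unfold Spec_solution
  simp only [solution, solution_alt]
  rw [pairs_eq_pvPairs report hpre, counter_eq]
  obtain ⟨h1, h2⟩ := A_inv report hpre
  have hPnd : (pvPairs report).Nodup := PySem.Set.nodup_ofList _
  apply List.map_congr_left
  intro u hu
  -- abbreviations
  set ds := report.foldl solutionBuild (PySem.Dict.empty, PySem.Dict.empty) with hds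
  set P := pvPairs report with hPdef
  set banned := PySem.Set.ofList
      (((PySem.Dict.counter (P.map Prod.snd)).items.filter (fun tc => decide (k ≤ tc.2))).map Prod.fst)
    with hbanned
  -- A side: the inner loop is a countP
  have hA : (ds.1.getD u []).foldl
        (fun tmp target => if k ≤ PySem.Set.len (ds.2.getD target []) then tmp + 1 else tmp) 0
      = (((ds.1.getD u []).countP (fun t => decide (k ≤ PySem.Set.len (ds.2.getD t []))) : Nat) : Int) := by
    rw [show (fun (tmp : Int) target => if k ≤ PySem.Set.len (ds.2.getD target []) then tmp + 1 else tmp)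
        = (fun (acc : Int) x =>
            if (fun t => decide (k ≤ PySem.Set.len (ds.2.getD t []))) x = true then acc + 1 else acc) from by
      funext acc x
      by_cases h : k ≤ PySem.Set.len (ds.2.getD x []) <;> simp [h]
      ]
    rw [PySem.List.foldl_count_if]
    simp
  rw [hA, countP_bucket (h1 u).1 hPnd (fun t => (h1 u).2 t)]
  -- B side: the scatter pass is a countP
  have hc0 : (id_list.foldl (fun d uid => d.insert uid (0 : Int)) PySem.Dict.empty).contains u = true := by
    rw [r0_contains]
    simp [hu]
  rw [scatter_getD banned P _ u hc0, r0_getD]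
  simp only [if_pos hu, zero_add]
  -- the two predicates agree on members of P
  congr 1
  apply List.countP_congr
  intro p hp
  have hsnd : p.2 ∈ P.map Prod.snd := List.mem_map.mpr ⟨p, hp, rfl⟩
  have hcount : (P.map Prod.snd).count p.2 = P.countP (fun q => q.2 == p.2) := by
    rw [List.count_eq_countP, List.countP_map]
    rfl
  have hban : banned.contains p.2 = true ↔ k ≤ ((P.countP (fun q => q.2 == p.2) : Nat) : Int) := by
    rw [show (banned.contains p.2 = true) ↔ p.2 ∈ banned from by simp]
    rw [hbanned, mem_banned]
    simp [hsnd, hcount]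
  constructor
  · intro h
    simp only [Bool.and_eq_true] at h ⊢
    refine ⟨hban.mpr ?_, h.2⟩
    have := h.1
    simp only [decide_eq_true_eq, PySem.Set.len] at this
    rwa [length_eq_countP_snd (h2 p.2).1 hPnd (fun v => (h2 p.2).2 v)] at this
  · intro h
    simp only [Bool.and_eq_true] at h ⊢
    refine ⟨?_, h.2⟩
    have := hban.mp h.1
    rw [← length_eq_countP_snd (h2 p.2).1 hPnd (fun v => (h2 p.2).2 v)] at this
    simp only [decide_eq_true_eq, PySem.Set.len]
    exact_mod_cast this
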